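-- pv_equiv track=rewrite | github.com/parthlathiya2697/openeye-backend-dev | app/server/utils/seo_grader.py | suggest_primary_keyword_density
-- ===== SOURCE A (Python) =====
-- def suggest_primary_keyword_density(paragraph, primary_keyword, n=100):
--     suggesstion = {}
--     reference_para_wordlist = paragraph.split()
--     reference_para_length = len(reference_para_wordlist)
--
--     num_chunks = reference_para_length//n
--
--     count = 0
--     for chunk in range(num_chunks):
--         if primary_keyword not in reference_para_wordlist[ n * chunk : n * (chunk + 1) ]:
--             count += 1
--
--     suggesstion['Keyword count in First Para'] = (primary_keyword, count, num_chunks)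
--     return suggesstion
-- ===== SOURCE B (Python) =====
-- def suggest_primary_keyword_density(paragraph, primary_keyword, n=100):
--     words = paragraph.split()
--     num_chunks = len(words) // n
--     hit = set()
--     for i, w in enumerate(words):
--         if w == primary_keyword and 0 <= i // n < num_chunks:
--             hit.add(i // n)
--     count = num_chunks - len(hit) if num_chunks > 0 else 0
--     return {'Keyword count in First Para': (primary_keyword, count, num_chunks)}
-- ===== Notes on version B (the rewrite author's own statement) =====
-- stated objective: alternative
-- what changed: Replaces the per-chunk loop that rescans an n-word slice for the keyword with a single enumerate pass over the word list collecting the set of chunk indices that contain the keyword, then computes count = num_chunks - len(hits).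
import Mathlib
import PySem

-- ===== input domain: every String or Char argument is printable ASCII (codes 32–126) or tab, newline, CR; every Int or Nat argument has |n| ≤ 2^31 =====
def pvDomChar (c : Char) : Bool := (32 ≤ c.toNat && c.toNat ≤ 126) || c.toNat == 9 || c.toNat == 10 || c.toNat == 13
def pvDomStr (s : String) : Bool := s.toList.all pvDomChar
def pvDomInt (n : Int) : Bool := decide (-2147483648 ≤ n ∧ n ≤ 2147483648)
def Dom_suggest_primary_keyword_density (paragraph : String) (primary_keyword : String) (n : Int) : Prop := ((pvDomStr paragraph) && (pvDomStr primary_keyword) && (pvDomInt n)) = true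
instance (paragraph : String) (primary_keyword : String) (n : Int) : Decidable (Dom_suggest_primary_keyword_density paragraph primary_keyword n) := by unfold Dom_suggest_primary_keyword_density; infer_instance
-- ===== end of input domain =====

-- B replaces A's per-chunk slice rescans with one enumerate pass collecting the set of keyword-bearing chunk indices; equal output proved for n ≠ 0 (n = 0 raises ZeroDivisionError in both).


-- ===== PORT A =====
def suggest_primary_keyword_density (paragraph : String) (primary_keyword : String) (n : Int) : List (String × String × Int × Int) :=
  let reference_para_wordlist := PySem.Str.split₀ paragraph
  let reference_para_length : Int := reference_para_wordlist.length
  let num_chunks := PySem.Int.floordiv reference_para_length n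
  let count : Int := (PySem.List.pyRange 0 num_chunks 1).foldl
    (fun count chunk =>
      if primary_keyword ∉ PySem.List.slice reference_para_wordlist (some (n * chunk)) (some (n * (chunk + 1)))
      then count + 1 else count) 0
  [("Keyword count in First Para", (primary_keyword, count, num_chunks))]

-- ===== PORT B =====
def suggest_primary_keyword_density_alt (paragraph : String) (primary_keyword : String) (n : Int) : List (String × String × Int × Int) :=
  let words := PySem.Str.split₀ paragraph
  let num_chunks := PySem.Int.floordiv (words.length : Int) n
  let hit : PySem.Set Int := (PySem.List.enumerate words 0).foldl
    (fun s p =>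
      if p.2 = primary_keyword ∧ 0 ≤ PySem.Int.floordiv p.1 n ∧ PySem.Int.floordiv p.1 n < num_chunks
      then PySem.Set.add s (PySem.Int.floordiv p.1 n) else s) PySem.Set.empty
  let count : Int := if num_chunks > 0 then num_chunks - (hit.length : Int) else 0
  [("Keyword count in First Para", (primary_keyword, count, num_chunks))]

-- ===== PRECONDITION & SPEC =====
-- Pre_ excludes exactly n = 0, where Python's '//' raises ZeroDivisionError in both A and B.
def Pre_suggest_primary_keyword_density (paragraph : String) (primary_keyword : String) (n : Int) : Prop := n ≠ 0
instance (paragraph : String) (primary_keyword : String) (n : Int) : Decidable (Pre_suggest_primary_keyword_density paragraph primary_keyword n) := by unfold Pre_suggest_primary_keyword_density; infer_instance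
def pvWitness_suggest_primary_keyword_density : String × String × Int := ("kw a kw b", "kw", 2)

def Spec_suggest_primary_keyword_density (paragraph : String) (primary_keyword : String) (n : Int) (out : List (String × String × Int × Int)) : Prop := out = suggest_primary_keyword_density_alt paragraph primary_keyword n
instance (paragraph : String) (primary_keyword : String) (n : Int) (out : List (String × String × Int × Int)) : Decidable (Spec_suggest_primary_keyword_density paragraph primary_keyword n out) := by unfold Spec_suggest_primary_keyword_density; infer_instance

-- ===== CLAIM (what is proved, stated in full; the proofs are below) =====
def Claim_equal_suggest_primary_keyword_density : Prop := ∀ (paragraph : String) (primary_keyword : String) (n : Int), Dom_suggest_primary_keyword_density paragraph primary_keyword n → Pre_suggest_primary_keyword_density paragraph primary_keyword n → Spec_suggest_primary_keyword_density paragraph primary_keyword n (suggest_primary_keyword_density paragraph primary_keyword n)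

-- ===== LEMMAS AND PROOFS =====

-- A's counting loop is a countP over the range.
lemma foldl_count_ite {α : Type} (p : α → Prop) [DecidablePred p] :
    ∀ (l : List α) (init : Int),
      l.foldl (fun c x => if p x then c + 1 else c) init = init + (l.countP (fun x => decide (p x)) : Int) := by
  intro l
  induction l with
  | nil => intro init; simp
  | cons x xs ih =>
    intro init
    by_cases hx : p x <;> simp [List.countP_cons, hx, ih] <;> ring

-- B's conditional Set.add loop is a fold of Set.add over the filtered, mapped list.
lemma foldl_add_ite {α : Type} (c : α → Prop) [DecidablePred c] (g : α → Int) :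
    ∀ (l : List α) (s : PySem.Set Int),
      l.foldl (fun s x => if c x then PySem.Set.add s (g x) else s) s
        = ((l.filter (fun x => decide (c x))).map g).foldl PySem.Set.add s := by
  intro l
  induction l with
  | nil => intro s; simp
  | cons x xs ih =>
    intro s
    by_cases hx : c x <;> simp [List.filter_cons, hx, ih]

-- chunk membership: for 0 < n, 0 ≤ c, c+1 ≤ num = len // n, the slice wl[n*c : n*(c+1)]
-- contains k iff some word with floor-div chunk index c equals k.
lemma mem_slice_iff_chunk (wl : List String) (k : String) (n c : Int)
    (hn : 0 < n) (hc : 0 ≤ c) (hcnum : c + 1 ≤ PySem.Int.floordiv (wl.length : Int) n) :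
    k ∈ PySem.List.slice wl (some (n * c)) (some (n * (c + 1)))
      ↔ ∃ i : Nat, ∃ h : i < wl.length, wl[i] = k ∧ PySem.Int.floordiv (i : Int) n = c := by
  have hnum := (PySem.Int.floordiv_eq_iff_of_pos (a := (wl.length : Int)) (b := n) (q := PySem.Int.floordiv (wl.length : Int) n) hn).mp rfl
  have hub : n * (c + 1) ≤ (wl.length : Int) := by nlinarith [hnum.1, hnum.2]
  have h0 : (0:Int) ≤ n * c := by positivity
  have hb0 : (0:Int) ≤ n * (c + 1) := by positivity
  rw [PySem.List.slice_toNat wl h0 hb0]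
  have ha : ((n * c).toNat : Int) = n * c := Int.toNat_of_nonneg h0
  have hb : ((n * (c + 1)).toNat : Int) = n * (c + 1) := Int.toNat_of_nonneg hb0
  have e1 : c * n = n * c := mul_comm c n
  have e2 : (c + 1) * n = n * (c + 1) := by ring
  constructor
  · intro hk
    obtain ⟨j, hj, hje⟩ := List.mem_iff_getElem.mp hk
    have hjlen : j < ((wl.drop (n*c).toNat).take ((n*(c+1)).toNat - (n*c).toNat)).length := hj
    simp [List.length_take, List.length_drop] at hjlen
    refine ⟨(n*c).toNat + j, by omega, ?_, ?_⟩
    · rw [← hje]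
      rw [List.getElem_take, List.getElem_drop]
    · rw [PySem.Int.floordiv_eq_iff_of_pos hn]
      constructor
      · push_cast; omega
      · push_cast; omega

  · rintro ⟨i, hi, hik, hifd⟩
    obtain ⟨hbd1, hbd2⟩ := (PySem.Int.floordiv_eq_iff_of_pos (a := (i:Int)) (b := n) (q := c) hn).mp hifd
    have hge : (n*c).toNat ≤ i := by omega
    have hlt : i < (n*(c+1)).toNat := by omega
    refine List.mem_iff_getElem.mpr ⟨i - (n*c).toNat, ?_, ?_⟩
    · simp [List.length_take, List.length_drop]
      omega
    · rw [List.getElem_take, List.getElem_drop]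
      have hidx : (n*c).toNat + (i - (n*c).toNat) = i := by omega
      simp only [hidx]
      exact hik

-- the main counting equivalence, over an arbitrary word list
lemma count_equiv (wl : List String) (k : String) (n : Int) (hn : n ≠ 0) :
    (PySem.List.pyRange 0 (PySem.Int.floordiv (wl.length : Int) n) 1).foldl
      (fun count chunk =>
        if k ∉ PySem.List.slice wl (some (n * chunk)) (some (n * (chunk + 1)))
        then count + 1 else count) 0
    = (if PySem.Int.floordiv (wl.length : Int) n > 0
       then PySem.Int.floordiv (wl.length : Int) n
            - (((PySem.List.enumerate wl 0).foldl
                  (fun s p =>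
                    if p.2 = k ∧ 0 ≤ PySem.Int.floordiv p.1 n ∧ PySem.Int.floordiv p.1 n < PySem.Int.floordiv (wl.length : Int) n
                    then PySem.Set.add s (PySem.Int.floordiv p.1 n) else s) PySem.Set.empty : PySem.Set Int).length : Int)
       else 0) := by
  set num := PySem.Int.floordiv (wl.length : Int) n with hnumdef
  by_cases hpos : num > 0
  · -- n must be positive
    have hn0 : 0 < n := by
      rcases lt_trichotomy n 0 with h | h | h
      · exfalso
        have : num ≤ 0 := by
          have := Int.fdiv_nonpos_of_nonneg_of_nonpos (a := (wl.length : Int)) (b := n) (by positivity) (le_of_lt h)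
          simpa [hnumdef, PySem.Int.floordiv] using this
        omega
      · exact absurd h hn
      · exact h
    simp only [hpos, if_pos]
    -- LHS: countP form
    rw [foldl_count_ite]
    set l := PySem.List.pyRange 0 num 1 with hl
    set P : Int → Prop := fun chunk => k ∈ PySem.List.slice wl (some (n * chunk)) (some (n * (chunk + 1))) with hP
    have hcount : l.countP (fun x => decide (¬ P x)) = l.length - l.countP (fun x => decide (P x)) := by
      have h1 := List.length_eq_countP_add_countP (l := l) (p := fun x => decide (P x))
      have h2 : l.countP (fun x => ¬ decide (P x)) = l.countP (fun x => decide (¬ P x)) := by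
        apply List.countP_congr; intro x _; simp
      omega
    -- RHS: hit set
    rw [foldl_add_ite (c := fun p : Int × String => p.2 = k ∧ 0 ≤ PySem.Int.floordiv p.1 n ∧ PySem.Int.floordiv p.1 n < num) (g := fun p => PySem.Int.floordiv p.1 n)]
    set M := (((PySem.List.enumerate wl 0).filter
        (fun p => decide (p.2 = k ∧ 0 ≤ PySem.Int.floordiv p.1 n ∧ PySem.Int.floordiv p.1 n < num))).map
        (fun p => PySem.Int.floordiv p.1 n)) with hM
    have hhit : M.foldl PySem.Set.add PySem.Set.empty = PySem.Set.ofList M := (PySem.Set.ofList_eq_foldl M).symm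
    rw [hhit]
    set T := l.filter (fun x => decide (P x)) with hT
    have hTnodup : T.Nodup := (PySem.List.nodup_pyRange_one 0 num).filter _
    have hSnodup : (PySem.Set.ofList M).Nodup := PySem.Set.nodup_ofList M
    have hmem : ∀ x : Int, x ∈ PySem.Set.ofList M ↔ x ∈ T := by
      intro c
      rw [PySem.Set.mem_ofList]
      constructor
      · intro hc
        obtain ⟨p, hpf, hpg⟩ := List.mem_map.mp hc
        have hpm := List.mem_filter.mp hpf
        obtain ⟨j, hj, hpe⟩ := (PySem.List.mem_enumerate_iff _ _ _).mp hpm.1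
        have hcond := hpm.2
        simp only [decide_eq_true_eq] at hcond
        subst hpe
        simp only at hcond hpg
        obtain ⟨hwk, hge, hlt⟩ := hcond
        rw [hT, List.mem_filter]
        have hcl : c < num := by rw [← hpg]; simpa using hlt
        have hcg : 0 ≤ c := by rw [← hpg]; simpa using hge
        constructor
        · rw [hl]; exact (PySem.List.mem_pyRange_one).mpr ⟨hcg, hcl⟩
        · simp only [hP, decide_eq_true_eq]
          rw [mem_slice_iff_chunk wl k n c hn0 hcg (by omega)]
          exact ⟨j, hj, hwk, by simpa using hpg⟩
      · intro hc
        rw [hT, List.mem_filter] at hc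
        have hcr := (PySem.List.mem_pyRange_one).mp (by rw [hl] at hc; exact hc.1)
        have hcg : 0 ≤ c := by omega
        have hcl : c < num := by omega
        have := hc.2
        simp only [hP, decide_eq_true_eq] at this
        rw [mem_slice_iff_chunk wl k n c hn0 hcg (by omega)] at this
        obtain ⟨i, hi, hik, hifd⟩ := this
        apply List.mem_map.mpr
        refine ⟨((i:Int), wl[i]), ?_, by simpa using hifd⟩
        apply List.mem_filter.mpr
        constructor
        · exact (PySem.List.mem_enumerate_iff _ _ _).mpr ⟨i, hi, by simp⟩
        · simp only [decide_eq_true_eq]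
          refine ⟨hik, ?_, ?_⟩ <;> simp [hifd] <;> omega
    have hperm : (PySem.Set.ofList M).Perm T := (List.perm_ext_iff_of_nodup hSnodup hTnodup).mpr hmem
    have hlen : (PySem.Set.ofList M).length = T.length := hperm.length_eq
    have hllen : l.length = num.toNat := by
      rw [hl, PySem.List.length_pyRange_one]; simp
    have hTle : T.length ≤ l.length := by rw [hT]; exact List.length_filter_le _ _
    have hTcount : l.countP (fun x => decide (P x)) = T.length := by
      rw [hT, List.countP_eq_length_filter]
    rw [hcount, hTcount, hlen]
    push_cast [hllen]
    omega
  · -- num ≤ 0: empty range on the left, 0 on the right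
    have hnil : PySem.List.pyRange 0 num 1 = [] := PySem.List.pyRange_one_eq_nil (by omega)
    rw [hnil]
    simp [hpos]

-- ===== VERDICT (by name: the statement is the Claim_ definition above) =====
theorem suggest_primary_keyword_density_spec : Claim_equal_suggest_primary_keyword_density := by
  intro paragraph primary_keyword n _ hn
  unfold Spec_suggest_primary_keyword_density suggest_primary_keyword_density suggest_primary_keyword_density_alt
  simp only []
  rw [count_equiv (PySem.Str.split₀ paragraph) primary_keyword n hn]
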